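-- pv_equiv track=rewrite | github.com/pypi-data/pypi-mirror-230 | packages/daconx/daconx-0.1.0.tar.gz/daconx-0.1.0/daconx/extract_extraction_utils.py | collect_local_variable_general
-- ===== SOURCE A (Python) =====
-- def collect_local_variable_general(items:list):
--     function_calls=[]
--     v_name = items[0].split('state_variable_name:')[-1]
--     v_value = ""
--     flag_read = False
--     for item in items[1:]:
--         if item in ['function_call:']: continue
--         if item.startswith('result_extraction_symbols["function_call"]'):
--             function_call_name = item.split('result_extraction_symbols["function_call"]')[-1]
--             if function_call_name not in function_calls:
--                 function_calls.append(function_call_name)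
--             continue
--         elif item.startswith('id:'): continue
--         elif item.startswith("visibility:"):continue
--         elif item.startswith("type:"):continue
--
--         if item.startswith('initial_value'):
--             flag_read=True
--         else:
--             if flag_read:
--                 if '@@' in item:
--                     item_ele = item.split("@@")
--                     v_value += item_ele[0]
--                 else:
--                     v_value += item
--     return v_name,v_value,function_calls
-- ===== SOURCE B (Python) =====
-- CALL_PREFIX = 'result_extraction_symbols["function_call"]'
--
-- def collect_local_variable_general(items: list):
--     v_name = items[0].split('state_variable_name:')[-1]
--
--     # pass 1: ordered-unique function call names
--     function_calls = []
--     seen = set()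
--     for item in items[1:]:
--         if item.startswith(CALL_PREFIX):
--             name = item.split(CALL_PREFIX)[-1]
--             if name not in seen:
--                 seen.add(name)
--                 function_calls.append(name)
--
--     # pass 2: the value text read after an 'initial_value' marker
--     parts = []
--     reading = False
--     for item in items[1:]:
--         if (item == 'function_call:' or item.startswith(CALL_PREFIX)
--                 or item.startswith('id:') or item.startswith('visibility:')
--                 or item.startswith('type:')):
--             continue
--         if item.startswith('initial_value'):
--             reading = True
--         elif reading:
--             parts.append(item.split('@@')[0] if '@@' in item else item)
--
--     return v_name, ''.join(parts), function_calls
-- ===== Notes on version B (the rewrite author's own statement) =====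
-- stated objective: alternative
-- what changed: Replaces A's single interleaved loop (mutable v_value string, flag and calls list updated together) by two single-purpose passes: one pass collecting ordered-unique call names with a seen-set, and one pass collecting value pieces into a list joined at the end.
import Mathlib
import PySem

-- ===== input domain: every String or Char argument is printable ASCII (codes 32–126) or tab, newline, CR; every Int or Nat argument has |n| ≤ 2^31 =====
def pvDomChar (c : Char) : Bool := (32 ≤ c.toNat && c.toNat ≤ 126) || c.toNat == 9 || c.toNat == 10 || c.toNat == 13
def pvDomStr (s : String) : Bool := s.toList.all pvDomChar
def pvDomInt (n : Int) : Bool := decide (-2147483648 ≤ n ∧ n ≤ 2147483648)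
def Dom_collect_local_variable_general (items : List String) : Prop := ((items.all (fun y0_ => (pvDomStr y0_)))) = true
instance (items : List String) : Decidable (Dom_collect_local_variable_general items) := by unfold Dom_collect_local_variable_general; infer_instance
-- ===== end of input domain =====

-- B replaces A's single interleaved loop by two single-purpose passes (calls with a seen-set,
-- then value pieces joined at the end); alternative decomposition, no speed claim.

-- ===== PORT A =====
-- A's loop body, one step of the fold over items[1:]; state = (v_value, flag_read, function_calls)
def cvgStepA (st : List Char × Bool × List (List Char)) (item : List Char) :
    List Char × Bool × List (List Char) :=
  let (v_value, flag_read, function_calls) := st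
  if item = "function_call:".toList then st
  else if PySem.Chars.startswith item "result_extraction_symbols[\"function_call\"]".toList then
    let function_call_name :=
      (PySem.Chars.splitOn item "result_extraction_symbols[\"function_call\"]".toList).getLastD []
    if function_call_name ∈ function_calls then st
    else (v_value, flag_read, function_calls ++ [function_call_name])
  else if PySem.Chars.startswith item "id:".toList then st
  else if PySem.Chars.startswith item "visibility:".toList then st
  else if PySem.Chars.startswith item "type:".toList then st
  else if PySem.Chars.startswith item "initial_value".toList then (v_value, true, function_calls)
  else if flag_read then
    (v_value ++ (if PySem.Chars.isIn "@@".toList item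
                 then (PySem.Chars.splitOn item "@@".toList).headD [] else item),
     flag_read, function_calls)
  else st

def collect_local_variable_general (items : List String) : String × String × List String :=
  match items with
  | [] => ("", "", [])   -- Python raises IndexError on items[0] here; excluded by Pre_
  | item0 :: rest =>
    let v_name := (PySem.Chars.splitOn item0.toList "state_variable_name:".toList).getLastD []
    let fin := (rest.map String.toList).foldl cvgStepA ([], false, [])
    (String.ofList v_name, String.ofList fin.1, fin.2.2.map String.ofList)

-- ===== PORT B =====
def cvgCALLPREFIX : List Char := "result_extraction_symbols[\"function_call\"]".toList

-- pass 1 of Source B: ordered-unique call names; state = (function_calls, seen)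
def cvgStep1 (st : List (List Char) × PySem.Set (List Char)) (item : List Char) :
    List (List Char) × PySem.Set (List Char) :=
  let (function_calls, seen) := st
  if PySem.Chars.startswith item cvgCALLPREFIX then
    let name := (PySem.Chars.splitOn item cvgCALLPREFIX).getLastD []
    if PySem.Set.contains seen name then st
    else (function_calls ++ [name], PySem.Set.add seen name)
  else st

-- pass 2 of Source B: value pieces; state = (parts, reading)
def cvgStep2 (st : List (List Char) × Bool) (item : List Char) : List (List Char) × Bool :=
  let (parts, reading) := st
  if item == "function_call:".toList || PySem.Chars.startswith item cvgCALLPREFIX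
      || PySem.Chars.startswith item "id:".toList
      || PySem.Chars.startswith item "visibility:".toList
      || PySem.Chars.startswith item "type:".toList then st
  else if PySem.Chars.startswith item "initial_value".toList then (parts, true)
  else if reading then
    (parts ++ [if PySem.Chars.isIn "@@".toList item
               then (PySem.Chars.splitOn item "@@".toList).headD [] else item], reading)
  else st

def collect_local_variable_general_alt (items : List String) : String × String × List String :=
  match items with
  | [] => ("", "", [])   -- Python raises IndexError on items[0] here; excluded by Pre_
  | item0 :: rest =>
    let v_name := (PySem.Chars.splitOn item0.toList "state_variable_name:".toList).getLastD []
    let tail := rest.map String.toList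
    let function_calls := (tail.foldl cvgStep1 ([], PySem.Set.empty)).1
    let parts := (tail.foldl cvgStep2 ([], false)).1
    (String.ofList v_name, String.ofList (PySem.Chars.join [] parts), function_calls.map String.ofList)

-- ===== PRECONDITION & SPEC =====
-- Pre_ excludes only the empty list, on which the Python A raises IndexError at items[0].
def Pre_collect_local_variable_general (items : List String) : Prop := items ≠ []
instance (items : List String) : Decidable (Pre_collect_local_variable_general items) := by
  unfold Pre_collect_local_variable_general; infer_instance
def pvWitness_collect_local_variable_general : List String :=
  ["state_variable_name:x", "initial_value", "1@@u"]

def Spec_collect_local_variable_general (items : List String) (out : String × String × List String) : Prop :=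
  out = collect_local_variable_general_alt items
instance (items : List String) (out : String × String × List String) :
    Decidable (Spec_collect_local_variable_general items out) := by
  unfold Spec_collect_local_variable_general; infer_instance

-- ===== CLAIM (what is proved, stated in full; the proofs are below) =====
def Claim_equal_collect_local_variable_general : Prop :=
  ∀ (items : List String), Dom_collect_local_variable_general items →
    Pre_collect_local_variable_general items →
    Spec_collect_local_variable_general items (collect_local_variable_general items)

-- ===== LEMMAS AND PROOFS =====

-- join with the empty separator concatenates
lemma cvg_join_nil_cons (a : List Char) (t : List (List Char)) :
    PySem.Chars.join [] (a :: t) = a ++ PySem.Chars.join [] t := by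
  cases t <;> simp [PySem.Chars.join, List.intercalate, List.intersperse]

-- pass 2 accumulates its parts on the right: the start value factors out
lemma cvg_step2_acc (l : List (List Char)) :
    ∀ (p : List (List Char)) (f : Bool),
    l.foldl cvgStep2 (p, f)
      = (p ++ (l.foldl cvgStep2 ([], f)).1, (l.foldl cvgStep2 ([], f)).2) := by
  induction l with
  | nil => intro p f; simp
  | cons x l ih =>
    intro p f
    simp only [List.foldl_cons]
    by_cases hskip : (x == "function_call:".toList || PySem.Chars.startswith x cvgCALLPREFIX
        || PySem.Chars.startswith x "id:".toList || PySem.Chars.startswith x "visibility:".toList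
        || PySem.Chars.startswith x "type:".toList) = true
    · have h2 : ∀ q : List (List Char), cvgStep2 (q, f) x = (q, f) := by
        intro q; simp only [cvgStep2]; rw [if_pos hskip]
      rw [h2, h2]; exact ih p f
    · by_cases hinit : PySem.Chars.startswith x "initial_value".toList = true
      · have h2 : ∀ q : List (List Char), cvgStep2 (q, f) x = (q, true) := by
          intro q; simp only [cvgStep2]; rw [if_neg hskip, if_pos hinit]
        rw [h2, h2]; exact ih p true
      · cases f with
        | false =>
          have h2 : ∀ q : List (List Char), cvgStep2 (q, false) x = (q, false) := by
            intro q; simp only [cvgStep2]; rw [if_neg hskip, if_neg hinit]; simp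
          rw [h2, h2]; exact ih p false
        | true =>
          have h2 : ∀ q : List (List Char), cvgStep2 (q, true) x
              = (q ++ [if PySem.Chars.isIn "@@".toList x
                       then (PySem.Chars.splitOn x "@@".toList).headD [] else x], true) := by
            intro q; simp only [cvgStep2]; rw [if_neg hskip, if_neg hinit]; simp
          rw [h2, h2]
          simp only [List.nil_append]
          rw [ih (p ++ [_]) true, ih [_] true]
          simp

-- the master invariant: A's single interleaved fold equals B's two folds run side by side
lemma cvg_master (l : List (List Char)) :
    ∀ (v : List Char) (f : Bool) (c : List (List Char)),
    l.foldl cvgStepA (v, f, c)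
      = (v ++ PySem.Chars.join [] (l.foldl cvgStep2 ([], f)).1,
         (l.foldl cvgStep2 ([], f)).2,
         (l.foldl cvgStep1 (c, c)).1) := by
  induction l with
  | nil => intro v f c; simp [PySem.Chars.join, List.intercalate]
  | cons x l ih =>
    intro v f c
    have hCP : cvgCALLPREFIX = "result_extraction_symbols[\"function_call\"]".toList := rfl
    simp only [List.foldl_cons]
    by_cases h1 : x = "function_call:".toList
    · have hA : cvgStepA (v, f, c) x = (v, f, c) := by
        simp only [cvgStepA]; rw [if_pos h1]
      have hB1 : cvgStep1 (c, c) x = (c, c) := by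
        subst h1; simp only [cvgStep1, hCP]
        rw [if_neg (show ¬ PySem.Chars.startswith "function_call:".toList
          "result_extraction_symbols[\"function_call\"]".toList = true from by decide)]
      have hsk : (x == "function_call:".toList || PySem.Chars.startswith x cvgCALLPREFIX
          || PySem.Chars.startswith x "id:".toList || PySem.Chars.startswith x "visibility:".toList
          || PySem.Chars.startswith x "type:".toList) = true := by
        simp only [Bool.or_eq_true, beq_iff_eq]
        exact Or.inl (Or.inl (Or.inl (Or.inl h1)))
      have hB2 : cvgStep2 ([], f) x = ([], f) := by simp only [cvgStep2]; rw [if_pos hsk]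
      rw [hA, hB1, hB2]; exact ih v f c
    · by_cases h2 : PySem.Chars.startswith x "result_extraction_symbols[\"function_call\"]".toList = true
      · have hsk : (x == "function_call:".toList || PySem.Chars.startswith x cvgCALLPREFIX
            || PySem.Chars.startswith x "id:".toList || PySem.Chars.startswith x "visibility:".toList
            || PySem.Chars.startswith x "type:".toList) = true := by
          simp only [Bool.or_eq_true, beq_iff_eq]
          exact Or.inl (Or.inl (Or.inl (Or.inr (hCP ▸ h2))))
        have hB2 : cvgStep2 ([], f) x = ([], f) := by simp only [cvgStep2]; rw [if_pos hsk]
        by_cases hmem : (PySem.Chars.splitOn x "result_extraction_symbols[\"function_call\"]".toList).getLastD [] ∈ c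
        · have hc : PySem.Set.contains c ((PySem.Chars.splitOn x "result_extraction_symbols[\"function_call\"]".toList).getLastD []) = true := by
            rw [PySem.Set.contains_iff]; exact hmem
          have hA : cvgStepA (v, f, c) x = (v, f, c) := by
            simp only [cvgStepA]; rw [if_neg h1, if_pos h2, if_pos hmem]
          have hB1 : cvgStep1 (c, c) x = (c, c) := by
            simp only [cvgStep1, hCP]; rw [if_pos h2, if_pos hc]
          rw [hA, hB1, hB2]; exact ih v f c
        · have hcn : ¬ PySem.Set.contains c ((PySem.Chars.splitOn x "result_extraction_symbols[\"function_call\"]".toList).getLastD []) = true := by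
            rw [PySem.Set.contains_iff]; exact hmem
          have hA : cvgStepA (v, f, c) x
              = (v, f, c ++ [(PySem.Chars.splitOn x "result_extraction_symbols[\"function_call\"]".toList).getLastD []]) := by
            simp only [cvgStepA]; rw [if_neg h1, if_pos h2, if_neg hmem]
          have hadd : PySem.Set.add c ((PySem.Chars.splitOn x "result_extraction_symbols[\"function_call\"]".toList).getLastD [])
              = c ++ [(PySem.Chars.splitOn x "result_extraction_symbols[\"function_call\"]".toList).getLastD []] := by
            simp only [PySem.Set.add]; rw [if_neg hcn]
          have hB1 : cvgStep1 (c, c) x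
              = (c ++ [(PySem.Chars.splitOn x "result_extraction_symbols[\"function_call\"]".toList).getLastD []],
                 c ++ [(PySem.Chars.splitOn x "result_extraction_symbols[\"function_call\"]".toList).getLastD []]) := by
            simp only [cvgStep1, hCP]; rw [if_pos h2, if_neg hcn, hadd]
          rw [hA, hB1, hB2]; exact ih v f _
      · have hB1 : cvgStep1 (c, c) x = (c, c) := by
          simp only [cvgStep1, hCP]; rw [if_neg h2]
        by_cases h3 : PySem.Chars.startswith x "id:".toList = true
        · have hA : cvgStepA (v, f, c) x = (v, f, c) := by
            simp only [cvgStepA]; rw [if_neg h1, if_neg h2, if_pos h3]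
          have hsk : (x == "function_call:".toList || PySem.Chars.startswith x cvgCALLPREFIX
              || PySem.Chars.startswith x "id:".toList || PySem.Chars.startswith x "visibility:".toList
              || PySem.Chars.startswith x "type:".toList) = true := by
            simp only [Bool.or_eq_true, beq_iff_eq]
            exact Or.inl (Or.inl (Or.inr h3))
          have hB2 : cvgStep2 ([], f) x = ([], f) := by simp only [cvgStep2]; rw [if_pos hsk]
          rw [hA, hB1, hB2]; exact ih v f c
        · by_cases h4 : PySem.Chars.startswith x "visibility:".toList = true
          · have hA : cvgStepA (v, f, c) x = (v, f, c) := by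
              simp only [cvgStepA]; rw [if_neg h1, if_neg h2, if_neg h3, if_pos h4]
            have hsk : (x == "function_call:".toList || PySem.Chars.startswith x cvgCALLPREFIX
                || PySem.Chars.startswith x "id:".toList || PySem.Chars.startswith x "visibility:".toList
                || PySem.Chars.startswith x "type:".toList) = true := by
              simp only [Bool.or_eq_true, beq_iff_eq]
              exact Or.inl (Or.inr h4)
            have hB2 : cvgStep2 ([], f) x = ([], f) := by simp only [cvgStep2]; rw [if_pos hsk]
            rw [hA, hB1, hB2]; exact ih v f c
          · by_cases h5 : PySem.Chars.startswith x "type:".toList = true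
            · have hA : cvgStepA (v, f, c) x = (v, f, c) := by
                simp only [cvgStepA]; rw [if_neg h1, if_neg h2, if_neg h3, if_neg h4, if_pos h5]
              have hsk : (x == "function_call:".toList || PySem.Chars.startswith x cvgCALLPREFIX
                  || PySem.Chars.startswith x "id:".toList || PySem.Chars.startswith x "visibility:".toList
                  || PySem.Chars.startswith x "type:".toList) = true := by
                simp only [Bool.or_eq_true, beq_iff_eq]
                exact Or.inr h5
              have hB2 : cvgStep2 ([], f) x = ([], f) := by simp only [cvgStep2]; rw [if_pos hsk]
              rw [hA, hB1, hB2]; exact ih v f c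
            · have hsk : ¬ (x == "function_call:".toList || PySem.Chars.startswith x cvgCALLPREFIX
                  || PySem.Chars.startswith x "id:".toList || PySem.Chars.startswith x "visibility:".toList
                  || PySem.Chars.startswith x "type:".toList) = true := by
                simp only [Bool.or_eq_true, beq_iff_eq, not_or]
                exact ⟨⟨⟨⟨h1, fun hh => h2 (hCP ▸ hh)⟩, h3⟩, h4⟩, h5⟩
              by_cases h6 : PySem.Chars.startswith x "initial_value".toList = true
              · have hA : cvgStepA (v, f, c) x = (v, true, c) := by
                  simp only [cvgStepA]; rw [if_neg h1, if_neg h2, if_neg h3, if_neg h4, if_neg h5, if_pos h6]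
                have hB2 : cvgStep2 ([], f) x = ([], true) := by
                  simp only [cvgStep2]; rw [if_neg hsk, if_pos h6]
                rw [hA, hB1, hB2]; exact ih v true c
              · cases f with
                | false =>
                  have hA : cvgStepA (v, false, c) x = (v, false, c) := by
                    simp only [cvgStepA]
                    rw [if_neg h1, if_neg h2, if_neg h3, if_neg h4, if_neg h5, if_neg h6]
                    simp
                  have hB2 : cvgStep2 ([], false) x = ([], false) := by
                    simp only [cvgStep2]; rw [if_neg hsk, if_neg h6]; simp
                  rw [hA, hB1, hB2]; exact ih v false c
                | true =>
                  have hA : cvgStepA (v, true, c) x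
                      = (v ++ (if PySem.Chars.isIn "@@".toList x
                               then (PySem.Chars.splitOn x "@@".toList).headD [] else x), true, c) := by
                    simp only [cvgStepA]
                    rw [if_neg h1, if_neg h2, if_neg h3, if_neg h4, if_neg h5, if_neg h6]
                    simp
                  have hB2 : cvgStep2 ([], true) x
                      = ([if PySem.Chars.isIn "@@".toList x
                          then (PySem.Chars.splitOn x "@@".toList).headD [] else x], true) := by
                    simp only [cvgStep2]; rw [if_neg hsk, if_neg h6]; simp
                  rw [hA, hB1, hB2]
                  rw [ih _ true c, cvg_step2_acc l [_] true]
                  simp [cvg_join_nil_cons]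

-- ===== VERDICT (by name: the statement is the Claim_ definition above) =====
theorem collect_local_variable_general_spec : Claim_equal_collect_local_variable_general := by
  intro items _ hpre
  unfold Spec_collect_local_variable_general
  cases items with
  | nil => exact absurd rfl hpre
  | cons item0 rest =>
    unfold collect_local_variable_general collect_local_variable_general_alt
    simp only []
    rw [cvg_master]
    rfl
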